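-- pv_equiv track=rewrite | github.com/Duc-Developer/crew-content-creator | src/tech_new_writer/source_fetcher.py | filter_image_candidates
-- ===== SOURCE A (Python) =====
-- BAD_IMAGE_KEYWORDS = (
--     "logo",
--     "icon",
--     "avatar",
--     "favicon",
--     "emoji",
--     "sprite",
--     "badge",
--     "thumbnail-icon",
--     "profile",
-- )
--
-- def score_image_url(image_url: str) -> int:
--     lowered = image_url.lower()
--     score = 0
--     if "og-image" in lowered or "ogimage" in lowered:
--         score += 50
--     if "twitter" in lowered:
--         score += 15
--     if "hero" in lowered or "cover" in lowered or "featured" in lowered: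
--         score += 40
--     if "1200" in lowered or "1600" in lowered or "800" in lowered:
--         score += 20
--     if lowered.endswith(".svg"):
--         score -= 100
--     if any(keyword in lowered for keyword in BAD_IMAGE_KEYWORDS):
--         score -= 80
--     if lowered.endswith(".jpg") or lowered.endswith(".jpeg") or lowered.endswith(".png") or ".jpg?" in lowered or ".png?" in lowered:
--         score += 10
--     return score
--
-- def filter_image_candidates(image_urls: list[str]) -> list[str]:
--     unique_urls: list[str] = []
--     for image_url in image_urls:
--         if image_url not in unique_urls:
--             unique_urls.append(image_url)
--
--     filtered = [url for url in unique_urls if score_image_url(url) > -20]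
--     filtered.sort(key=score_image_url, reverse=True)
--     return filtered[:2]
-- ===== SOURCE B (Python) =====
-- BAD_IMAGE_KEYWORDS = (
--     "logo",
--     "icon",
--     "avatar",
--     "favicon",
--     "emoji",
--     "sprite",
--     "badge",
--     "thumbnail-icon",
--     "profile",
-- )
--
-- def score_image_url(image_url: str) -> int:
--     # Table-driven scoring: evaluate each rule once, sum the weights of the hits.
--     lowered = image_url.lower()
--     rules = (
--         (any(s in lowered for s in ("og-image", "ogimage")), 50),
--         ("twitter" in lowered, 15),
--         (any(s in lowered for s in ("hero", "cover", "featured")), 40),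
--         (any(s in lowered for s in ("1200", "1600", "800")), 20),
--         (lowered.endswith(".svg"), -100),
--         (any(k in lowered for k in BAD_IMAGE_KEYWORDS), -80),
--         (any(lowered.endswith(s) for s in (".jpg", ".jpeg", ".png"))
--          or ".jpg?" in lowered or ".png?" in lowered, 10),
--     )
--     return sum(w for hit, w in rules if hit)
--
-- def _candidates(image_urls):
--     # Yield (url, score) for each first occurrence whose score survives the cut.
--     seen = set()
--     for url in image_urls:
--         if url not in seen:
--             seen.add(url)
--             s = score_image_url(url)
--             if s > -20:
--                 yield (url, s)
--
-- def filter_image_candidates(image_urls: list[str]) -> list[str]: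
--     # Single linear scan keeping (best, second); a candidate displaces only on a
--     # STRICTLY greater score, so earlier candidates win ties like a stable
--     # reverse sort would.
--     best = None
--     second = None
--     for cand in _candidates(image_urls):
--         if best is None or cand[1] > best[1]:
--             best, second = cand, best
--         elif second is None or cand[1] > second[1]:
--             second = cand
--     out = []
--     if best is not None:
--         out.append(best[0])
--     if second is not None:
--         out.append(second[0])
--     return out
-- ===== Notes on version B (the rewrite author's own statement) =====
-- stated objective: faster
-- what changed: B replaces the list-membership dedup + full stable reverse sort with a single set-based gathering pass that scores each url once (table-driven scoring) and a linear best/second scan using strict '>' so earlier candidates win ties, instead of sorting everything and slicing the first two.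
import Mathlib
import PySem

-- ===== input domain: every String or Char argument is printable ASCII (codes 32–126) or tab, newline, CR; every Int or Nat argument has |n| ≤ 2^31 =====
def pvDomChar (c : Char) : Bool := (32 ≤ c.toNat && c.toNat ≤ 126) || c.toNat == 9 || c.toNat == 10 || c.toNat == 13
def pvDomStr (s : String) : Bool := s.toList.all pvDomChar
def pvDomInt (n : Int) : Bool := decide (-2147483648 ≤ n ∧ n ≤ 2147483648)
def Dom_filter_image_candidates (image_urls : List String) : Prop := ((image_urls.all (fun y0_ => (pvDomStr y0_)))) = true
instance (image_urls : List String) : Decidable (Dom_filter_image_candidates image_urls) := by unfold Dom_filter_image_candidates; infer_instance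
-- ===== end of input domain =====

-- B replaces dedup-by-list-scan + full stable reverse sort with a set-based single
-- gathering pass (table-driven scoring) and a linear best/second top-2 selection.

-- ===== PORT A =====
def BAD_IMAGE_KEYWORDS : List String :=
  ["logo", "icon", "avatar", "favicon", "emoji", "sprite", "badge", "thumbnail-icon", "profile"]

def score_image_url (image_url : String) : Int :=
  let lowered := PySem.Str.lower image_url
  let score : Int := 0
  let score := if PySem.Str.isIn "og-image" lowered || PySem.Str.isIn "ogimage" lowered then score + 50 else score
  let score := if PySem.Str.isIn "twitter" lowered then score + 15 else score
  let score := if PySem.Str.isIn "hero" lowered || PySem.Str.isIn "cover" lowered || PySem.Str.isIn "featured" lowered then score + 40 else score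
  let score := if PySem.Str.isIn "1200" lowered || PySem.Str.isIn "1600" lowered || PySem.Str.isIn "800" lowered then score + 20 else score
  let score := if PySem.Str.endswith lowered ".svg" then score - 100 else score
  let score := if BAD_IMAGE_KEYWORDS.any (fun keyword => PySem.Str.isIn keyword lowered) then score - 80 else score
  let score := if PySem.Str.endswith lowered ".jpg" || PySem.Str.endswith lowered ".jpeg" || PySem.Str.endswith lowered ".png" || PySem.Str.isIn ".jpg?" lowered || PySem.Str.isIn ".png?" lowered then score + 10 else score
  score

def filter_image_candidates (image_urls : List String) : List String :=
  let unique_urls : List String :=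
    image_urls.foldl (fun acc image_url => if image_url ∈ acc then acc else acc ++ [image_url]) []
  let filtered := unique_urls.filter (fun url => decide (score_image_url url > -20))
  (PySem.List.sorted filtered score_image_url true).take 2

-- ===== PORT B =====
-- table-driven score: the list of (rule hit?, weight) pairs, summed over the hits
def pvScoreRules (lowered : String) : List (Bool × Int) :=
  [ (["og-image", "ogimage"].any (fun s => PySem.Str.isIn s lowered), 50),
    (PySem.Str.isIn "twitter" lowered, 15),
    (["hero", "cover", "featured"].any (fun s => PySem.Str.isIn s lowered), 40),
    (["1200", "1600", "800"].any (fun s => PySem.Str.isIn s lowered), 20),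
    (PySem.Str.endswith lowered ".svg", -100),
    (BAD_IMAGE_KEYWORDS.any (fun k => PySem.Str.isIn k lowered), -80),
    (([".jpg", ".jpeg", ".png"].any (fun s => PySem.Str.endswith lowered s))
       || PySem.Str.isIn ".jpg?" lowered || PySem.Str.isIn ".png?" lowered, 10) ]

def score_image_url_b (image_url : String) : Int :=
  ((pvScoreRules (PySem.Str.lower image_url)).filter (fun r => r.1)).foldl (fun a r => a + r.2) 0

-- the generator _candidates: first occurrences (set-based) whose score survives the cut
def pvCandidates : List String → PySem.Set String → List (String × Int)
  | [], _ => []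
  | url :: rest, seen =>
    if seen.contains url then pvCandidates rest seen
    else
      let s := score_image_url_b url
      if s > -20 then (url, s) :: pvCandidates rest (seen.add url)
      else pvCandidates rest (seen.add url)

-- the best/second selection loop, as tail recursion over the same (best, second) state
def pvSelect : List (String × Int) → Option (String × Int) → Option (String × Int) → List String
  | [], best, second =>
      (match best with | none => [] | some b => [b.1]) ++
      (match second with | none => [] | some s => [s.1])
  | cand :: rest, best, second =>
      if (match best with | none => true | some b => decide (cand.2 > b.2)) then
        pvSelect rest (some cand) best
      else if (match second with | none => true | some s => decide (cand.2 > s.2)) then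
        pvSelect rest best (some cand)
      else pvSelect rest best second

def filter_image_candidates_alt (image_urls : List String) : List String :=
  pvSelect (pvCandidates image_urls PySem.Set.empty) none none

-- ===== PRECONDITION & SPEC =====
def Spec_filter_image_candidates (image_urls : List String) (out : List String) : Prop := out = filter_image_candidates_alt image_urls
instance (image_urls : List String) (out : List String) : Decidable (Spec_filter_image_candidates image_urls out) := by unfold Spec_filter_image_candidates; infer_instance

-- ===== CLAIM (what is proved, stated in full; the proofs are below) =====
def Claim_equal_filter_image_candidates : Prop := ∀ (image_urls : List String), Dom_filter_image_candidates image_urls → Spec_filter_image_candidates image_urls (filter_image_candidates image_urls)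

-- ===== LEMMAS AND PROOFS =====

-- the two scoring functions agree
theorem pvScoreShape (c1 c2 c3 c4 c5 c6 c7 : Bool) :
    (let s : Int := 0
     let s := if c1 then s + 50 else s
     let s := if c2 then s + 15 else s
     let s := if c3 then s + 40 else s
     let s := if c4 then s + 20 else s
     let s := if c5 then s - 100 else s
     let s := if c6 then s - 80 else s
     let s := if c7 then s + 10 else s
     s)
    = (([((c1 : Bool), (50 : Int)), (c2, 15), (c3, 40), (c4, 20), (c5, -100), (c6, -80),
        (c7, 10)].filter (fun r => r.1)).foldl (fun a r => a + r.2) 0) := by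
  cases c1 <;> cases c2 <;> cases c3 <;> cases c4 <;> cases c5 <;> cases c6 <;> cases c7 <;> decide

theorem score_eq (u : String) : score_image_url_b u = score_image_url u := by
  unfold score_image_url score_image_url_b pvScoreRules
  simp only [List.any_cons, List.any_nil, Bool.or_false, Bool.or_assoc]
  exact (pvScoreShape _ _ _ _ _ _ _).symm

-- B's gathering pass computes A's filtered unique list, paired with its scores
theorem pvCandidates_bridge (l : List String) (seen : List String) :
    ((l.foldl (fun acc u => if u ∈ acc then acc else acc ++ [u]) seen).filter
        (fun u => decide (score_image_url u > -20))).map (fun u => (u, score_image_url u))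
      = (seen.filter (fun u => decide (score_image_url u > -20))).map
          (fun u => (u, score_image_url u)) ++ pvCandidates l seen := by
  induction l generalizing seen with
  | nil => simp [pvCandidates]
  | cons x l ih =>
      by_cases hx : x ∈ seen
      · have hc : (PySem.Set.contains seen x) = true := by
          simpa [PySem.Set.contains_iff] using hx
        simpa [List.foldl_cons, pvCandidates, hc, if_pos hx] using ih seen
      · have hc : (PySem.Set.contains seen x) = false := by
          simp only [Bool.eq_false_iff, Ne, PySem.Set.contains_iff]
          exact hx
        have hadd : PySem.Set.add seen x = seen ++ [x] := by
          simp [PySem.Set.add, hx]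
        have := ih (seen ++ [x])
        by_cases hs : score_image_url x > -20 <;>
          simp [List.foldl_cons, pvCandidates, if_neg hx, hadd, score_eq, hs,
            List.filter_append] at this ⊢ <;> exact this

-- selection state machinery (proof-only): the one-step update pvSelect performs
def pvBSel (bs : Option (String × Int) × Option (String × Int)) (cand : String × Int) :
    Option (String × Int) × Option (String × Int) :=
  if (match bs.1 with | none => true | some best => decide (cand.2 > best.2)) then
    (some cand, bs.1)
  else if (match bs.2 with | none => true | some second => decide (cand.2 > second.2)) then
    (bs.1, some cand)
  else bs

theorem pvSelect_eq_foldl (cs : List (String × Int)) (b s : Option (String × Int)) :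
    pvSelect cs b s =
      ((match (cs.foldl pvBSel (b, s)).1 with | none => [] | some x => [x.1]) ++
       (match (cs.foldl pvBSel (b, s)).2 with | none => [] | some x => [x.1])) := by
  induction cs generalizing b s with
  | nil => rfl
  | cons c cs ih =>
      by_cases h1 : (match b with | none => true | some best => decide (c.2 > best.2)) = true
      · simp [pvSelect, pvBSel, h1, List.foldl_cons, ih]
      · by_cases h2 : (match s with | none => true | some second => decide (c.2 > second.2)) = true <;>
          simp [pvSelect, pvBSel, h1, h2, List.foldl_cons, ih]

-- top-2 state of a sorted list, with scores attached
def pvStateOf (xs : List String) : Option (String × Int) × Option (String × Int) :=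
  match xs with
  | [] => (none, none)
  | [a] => (some (a, score_image_url a), none)
  | a :: b :: _ => (some (a, score_image_url a), some (b, score_image_url b))

theorem pvStateOf_insertBy (x : String) (acc : List String) :
    pvStateOf (PySem.List.insertBy (fun a b => decide (score_image_url b < score_image_url a)) x acc)
      = pvBSel (pvStateOf acc) (x, score_image_url x) := by
  match acc with
  | [] => simp [pvStateOf, PySem.List.insertBy, pvBSel]
  | [y] =>
      by_cases h : score_image_url y < score_image_url x <;>
        simp [pvStateOf, PySem.List.insertBy, pvBSel, h]
  | y :: z :: t =>
      by_cases h1 : score_image_url y < score_image_url x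
      · simp [pvStateOf, PySem.List.insertBy, pvBSel, h1]
      · by_cases h2 : score_image_url z < score_image_url x <;>
          simp [pvStateOf, PySem.List.insertBy, pvBSel, h1, h2]

theorem pvStateOf_foldl_insertBy (l : List String) (acc : List String) :
    pvStateOf (l.foldl (fun acc x =>
        PySem.List.insertBy (fun a b => decide (score_image_url b < score_image_url a)) x acc) acc)
      = l.foldl (fun bs u => pvBSel bs (u, score_image_url u)) (pvStateOf acc) := by
  induction l generalizing acc with
  | nil => rfl
  | cons x l ih => simp [List.foldl_cons, ih, pvStateOf_insertBy]

theorem pvRender_stateOf (xs : List String) :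
    ((match (pvStateOf xs).1 with | none => [] | some best => [best.1]) ++
     (match (pvStateOf xs).2 with | none => [] | some second => [second.1])) = xs.take 2 := by
  match xs with
  | [] => rfl
  | [a] => rfl
  | a :: b :: t => rfl

theorem filter_image_candidates_eq_alt (image_urls : List String) :
    filter_image_candidates image_urls = filter_image_candidates_alt image_urls := by
  unfold filter_image_candidates filter_image_candidates_alt
  dsimp only
  set f := (image_urls.foldl (fun acc u => if u ∈ acc then acc else acc ++ [u]) []).filter
      (fun u => decide (score_image_url u > -20)) with hf
  have hcand : pvCandidates image_urls PySem.Set.empty = f.map (fun u => (u, score_image_url u)) := by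
    have := pvCandidates_bridge image_urls []
    simpa [PySem.Set.empty, hf] using this.symm
  rw [hcand, PySem.List.sorted_rev_eq_foldl_insertBy, ← pvRender_stateOf,
    pvStateOf_foldl_insertBy f [], pvSelect_eq_foldl,
    List.foldl_map (f := fun u => (u, score_image_url u)) (g := pvBSel)]
  rfl

-- ===== VERDICT (by name: the statement is the Claim_ definition above) =====
theorem filter_image_candidates_spec : Claim_equal_filter_image_candidates := by
  intro image_urls _
  exact filter_image_candidates_eq_alt image_urls
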